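-- pv_equiv track=rewrite | github.com/Kodsport/swedish-olympiad-2015 | final/bergsvandring/data/gen_testcase.py | gen_many_valleys
-- ===== SOURCE A (Python) =====
-- coord_max = 1000000
--
-- def gen_many_valleys(n):
--     xs = range(1, n+1)
--     ys = [coord_max // 2] * n
--     for i in range(1, n):
--         ys[i] = ys[i-1] + i
--     for i in range(1, n-1):
--         if i % 3 == 1:
--             ys[i] = 0
--     return zip(xs, ys)
-- ===== SOURCE B (Python) =====
-- coord_max = 1000000
--
-- def gen_many_valleys(n):
--     base = coord_max // 2
--     ys = [0 if (i % 3 == 1 and 1 <= i and i < n - 1) else base + i * (i + 1) // 2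
--           for i in range(n)]
--     return zip(range(1, n + 1), ys)
-- ===== Notes on version B (the rewrite author's own statement) =====
-- stated objective: simpler
-- what changed: Replaces the two sequential mutation passes (cumulative-sum loop then zero-override loop) by a single list comprehension computing each y directly with the closed form base + i*(i+1)//2, with the zero-override folded into the same conditional expression.
import Mathlib
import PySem

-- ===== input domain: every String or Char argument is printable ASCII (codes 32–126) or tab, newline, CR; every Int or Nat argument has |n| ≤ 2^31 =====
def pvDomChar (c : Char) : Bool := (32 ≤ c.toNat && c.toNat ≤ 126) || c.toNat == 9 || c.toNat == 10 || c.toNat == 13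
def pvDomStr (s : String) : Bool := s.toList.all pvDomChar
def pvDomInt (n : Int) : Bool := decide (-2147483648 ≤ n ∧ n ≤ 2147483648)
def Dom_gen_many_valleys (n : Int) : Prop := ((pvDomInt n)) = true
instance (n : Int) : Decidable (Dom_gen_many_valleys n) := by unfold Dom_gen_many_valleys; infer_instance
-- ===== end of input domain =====

-- B computes each y directly with the closed form base + i*(i+1)//2 in one comprehension
-- instead of A's two sequential mutation passes (same return value for every n).

-- ===== PORT A =====
def gen_many_valleys (n : Int) : List (Int × Int) :=
  let xs := PySem.List.pyRange 1 (n + 1) 1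
  let ys : List Int := List.replicate n.toNat (PySem.Int.floordiv 1000000 2)
  let ys := (PySem.List.pyRange 1 n 1).foldl
    (fun ys i => PySem.List.pySetD ys i (PySem.List.pyGetD ys (i - 1) 0 + i)) ys
  let ys := (PySem.List.pyRange 1 (n - 1) 1).foldl
    (fun ys i => if PySem.Int.mod i 3 == 1 then PySem.List.pySetD ys i 0 else ys) ys
  List.zip xs ys

-- ===== PORT B =====
def gen_many_valleys_alt (n : Int) : List (Int × Int) :=
  let base := PySem.Int.floordiv 1000000 2
  let ys := (PySem.List.pyRange 0 n 1).map
    (fun i => if PySem.Int.mod i 3 == 1 && decide (1 ≤ i) && decide (i < n - 1)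
              then 0 else base + PySem.Int.floordiv (i * (i + 1)) 2)
  List.zip (PySem.List.pyRange 1 (n + 1) 1) ys

-- ===== PRECONDITION & SPEC =====
def Spec_gen_many_valleys (n : Int) (out : List (Int × Int)) : Prop := out = gen_many_valleys_alt n
instance (n : Int) (out : List (Int × Int)) : Decidable (Spec_gen_many_valleys n out) := by unfold Spec_gen_many_valleys; infer_instance

-- ===== CLAIM (what is proved, stated in full; the proofs are below) =====
def Claim_equal_gen_many_valleys : Prop := ∀ (n : Int), Dom_gen_many_valleys n → Spec_gen_many_valleys n (gen_many_valleys n)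

-- ===== LEMMAS AND PROOFS =====

-- y-value after A's first (cumulative-sum) pass, at Nat index i
def pvTri (i : Nat) : Int := 500000 + ((i * (i + 1) / 2 : Nat) : Int)

-- triangular-number step used by the first-loop invariant
lemma pv_tri_step (j : Nat) : pvTri j + ((j + 1 : Nat) : Int) = pvTri (j + 1) := by
  simp only [pvTri]
  have key : ∀ p : Nat, (p + (j + 1) * 2) / 2 = p / 2 + (j + 1) := fun p => by omega
  have h : (j + 1) * ((j + 1) + 1) / 2 = j * (j + 1) / 2 + (j + 1) := by
    rw [show (j + 1) * ((j + 1) + 1) = j * (j + 1) + (j + 1) * 2 by ring, key]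
  rw [h]; push_cast; ring

-- invariant of A's first loop: after folding range(1, k), positions < k hold the prefix sums
lemma pv_loop1 (m : Nat) (k : Nat) (hk : k ≤ m) :
    (PySem.List.pyRange 1 (k : Int) 1).foldl
      (fun ys i => PySem.List.pySetD ys i (PySem.List.pyGetD ys (i - 1) 0 + i))
      (List.replicate m (500000 : Int))
    = (List.range m).map (fun i => if i < k then pvTri i else 500000) := by
  induction k with
  | zero =>
      rw [PySem.List.pyRange_one_eq_nil (by omega)]
      simp only [List.foldl_nil]
      apply List.ext_getElem
      · simp
      · intro i h1 h2
        simp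
  | succ k ih =>
      rcases Nat.eq_zero_or_pos k with hk0 | hk0
      · subst hk0
        rw [show ((0 + 1 : Nat) : Int) = 1 by norm_num,
            PySem.List.pyRange_one_eq_nil (by omega)]
        simp only [List.foldl_nil]
        apply List.ext_getElem
        · simp
        · intro i h1 h2
          simp only [List.getElem_map, List.getElem_range, List.getElem_replicate]
          rcases Nat.eq_zero_or_pos i with h | h
          · simp [h, pvTri]
          · simp [show ¬ i < 0 + 1 by omega]
      · have hkm : k ≤ m := by omega
        rw [show ((k + 1 : Nat) : Int) = (k : Int) + 1 by push_cast; ring,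
            PySem.List.pyRange_one_succ_right (by exact_mod_cast Nat.one_le_iff_ne_zero.mpr (by omega)),
            List.foldl_append, ih hkm]
        simp only [List.foldl_cons, List.foldl_nil]
        have hget : PySem.List.pyGetD
            ((List.range m).map (fun i => if i < k then pvTri i else 500000)) ((k : Int) - 1) 0
            = pvTri (k - 1) := by
          rw [show ((k : Int) - 1) = ((k - 1 : Nat) : Int) by omega,
              PySem.List.pyGetD_natCast]
          have h1 : k - 1 < m := by omega
          have h2 : k - 1 < k := by omega
          simp [List.getD_eq_getElem?_getD, h1, h2]
        rw [hget, PySem.List.pySetD_natCast]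
        apply List.ext_getElem
        · simp
        · intro i h1 h2
          simp only [List.getElem_set, List.getElem_map, List.getElem_range]
          by_cases hik : i = k
          · subst hik
            simp only [show i < i + 1 by omega, if_pos]
            obtain ⟨j, rfl⟩ : ∃ j, i = j + 1 := ⟨i - 1, by omega⟩
            simpa using pv_tri_step j
          · have hki : ¬ k = i := fun h => hik h.symm
            by_cases h3 : i < k
            · simp [hki, h3, show i < k + 1 by omega]
            · simp [hki, h3, show ¬ i < k + 1 by omega]

-- invariant of A's second (zero-override) loop
lemma pv_loop2 (m : Nat) (g : Nat → Int) (k : Nat) (hk : k ≤ m) :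
    (PySem.List.pyRange 1 (k : Int) 1).foldl
      (fun ys i => if PySem.Int.mod i 3 == 1 then PySem.List.pySetD ys i 0 else ys)
      ((List.range m).map g)
    = (List.range m).map (fun i => if 1 ≤ i ∧ i < k ∧ i % 3 = 1 then 0 else g i) := by
  induction k with
  | zero =>
      rw [PySem.List.pyRange_one_eq_nil (by omega)]
      simp only [List.foldl_nil]
      apply List.ext_getElem
      · simp
      · intro i h1 h2
        simp only [List.getElem_map, List.getElem_range]
        rw [if_neg (by omega)]
  | succ k ih =>
      rcases Nat.eq_zero_or_pos k with hk0 | hk0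
      · subst hk0
        rw [show ((0 + 1 : Nat) : Int) = 1 by norm_num,
            PySem.List.pyRange_one_eq_nil (by omega)]
        simp only [List.foldl_nil]
        apply List.ext_getElem
        · simp
        · intro i h1 h2
          simp only [List.getElem_map, List.getElem_range]
          rw [if_neg (by omega)]
      · have hkm : k ≤ m := by omega
        rw [show ((k + 1 : Nat) : Int) = (k : Int) + 1 by push_cast; ring,
            PySem.List.pyRange_one_succ_right (by exact_mod_cast Nat.one_le_iff_ne_zero.mpr (by omega)),
            List.foldl_append, ih hkm]
        simp only [List.foldl_cons, List.foldl_nil]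
        have hmod : PySem.Int.mod (k : Int) 3 = ((k % 3 : Nat) : Int) := by
          exact_mod_cast PySem.Int.mod_natCast k 3
        rw [hmod]
        by_cases h3 : k % 3 = 1
        · rw [if_pos (by simp [h3])]
          rw [PySem.List.pySetD_natCast]
          apply List.ext_getElem
          · simp
          · intro i h1 h2
            simp only [List.getElem_set, List.getElem_map, List.getElem_range]
            by_cases hik : i = k
            · subst hik
              simp [show 1 ≤ i ∧ i < i + 1 ∧ i % 3 = 1 from ⟨by omega, by omega, h3⟩]
            · have hki : ¬ k = i := fun h => hik h.symm
              by_cases hc : 1 ≤ i ∧ i < k ∧ i % 3 = 1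
              · simp [hki, hc, show 1 ≤ i ∧ i < k + 1 ∧ i % 3 = 1 from ⟨hc.1, by omega, hc.2.2⟩]
              · simp [hki, hc]
                intro hx hy hz
                exact absurd ⟨hx, by omega, hz⟩ hc
        · rw [if_neg (by simp; omega)]
          apply List.ext_getElem
          · simp
          · intro i h1 h2
            simp only [List.getElem_map, List.getElem_range]
            by_cases hc : 1 ≤ i ∧ i < k ∧ i % 3 = 1
            · simp [hc, show 1 ≤ i ∧ i < k + 1 ∧ i % 3 = 1 from ⟨hc.1, by omega, hc.2.2⟩]
            · simp [hc]
              intro hx hy hz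
              exact absurd ⟨hx, by omega, hz⟩ hc

-- ===== VERDICT (by name: the statement is the Claim_ definition above) =====
theorem gen_many_valleys_spec : Claim_equal_gen_many_valleys := by
  intro n _
  simp only [Spec_gen_many_valleys]
  dsimp only [gen_many_valleys, gen_many_valleys_alt]
  by_cases hn : n ≤ 0
  · rw [PySem.List.pyRange_one_eq_nil (by omega)]
    simp
  · replace hn : 0 < n := by omega
    obtain ⟨m, hm, rfl⟩ : ∃ m : Nat, 1 ≤ m ∧ n = (m : Int) :=
      ⟨n.toNat, by omega, by omega⟩
    congr 1
    have hbase : PySem.Int.floordiv 1000000 2 = (500000 : Int) := by decide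
    rw [hbase, Int.toNat_natCast]
    rw [pv_loop1 m m le_rfl]
    simp only [pvTri]
    rw [show ((m : Int) - 1) = ((m - 1 : Nat) : Int) by omega,
        pv_loop2 m _ (m - 1) (by omega)]
    rw [PySem.List.pyRange_zero_natCast]
    rw [List.map_map]
    refine List.map_congr_left (fun i hi => ?_)
    have him : i < m := List.mem_range.mp hi
    simp only [Function.comp_apply]
    have hmod : PySem.Int.mod (i : Int) 3 = ((i % 3 : Nat) : Int) := by
      exact_mod_cast PySem.Int.mod_natCast i 3
    have hdiv : PySem.Int.floordiv ((i : Int) * ((i : Int) + 1)) 2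
        = ((i * (i + 1) / 2 : Nat) : Int) := by
      rw [show ((i : Int) * ((i : Int) + 1)) = ((i * (i + 1) : Nat) : Int) by push_cast; ring]
      exact_mod_cast PySem.Int.floordiv_natCast (i * (i + 1)) 2
    by_cases hc : 1 ≤ i ∧ i < m - 1 ∧ i % 3 = 1
    · have hb : (PySem.Int.mod (i : Int) 3 == 1 && decide ((1 : Int) ≤ (i : Int))
          && decide ((i : Int) < ((m - 1 : Nat) : Int))) = true := by
        simp only [hmod, Bool.and_eq_true, decide_eq_true_eq, beq_iff_eq]
        exact ⟨⟨by exact_mod_cast hc.2.2, by exact_mod_cast hc.1⟩, by omega⟩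
      rw [if_pos hc, if_pos hb]
    · have hb : ¬ ((PySem.Int.mod (i : Int) 3 == 1 && decide ((1 : Int) ≤ (i : Int))
          && decide ((i : Int) < ((m - 1 : Nat) : Int))) = true) := by
        simp only [hmod, Bool.and_eq_true, decide_eq_true_eq, beq_iff_eq]
        rintro ⟨⟨h1, h2⟩, h3⟩
        exact hc ⟨by exact_mod_cast h2, by omega, by exact_mod_cast h1⟩
      rw [if_neg hc, if_pos him, if_neg hb, hdiv]
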